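-- pv_equiv track=rewrite | github.com/bica-tools/reticulate | reticulate/birkhoff.py | _quotient_join_irreducibles
-- ===== SOURCE A (Python) =====
-- def _quotient_hasse(
--     nodes: set[int],
--     fwd_adj: dict[int, set[int]],
--     fwd_reach: dict[int, set[int]],
-- ) -> list[tuple[int, int]]:
--     """Compute covering relation on the quotient DAG.
--
--     (a, b) means a covers b: a > b and no c with a > c > b.
--     """
--     edges: list[tuple[int, int]] = []
--     for a in nodes:
--         direct = fwd_adj[a]
--         for b in direct:
--             is_cover = True
--             for c in direct:
--                 if c == b:
--                     continue
--                 if b in fwd_reach[c]: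
--                     is_cover = False
--                     break
--             if is_cover:
--                 edges.append((a, b))
--     return edges
--
-- def _quotient_join_irreducibles(
--     nodes: set[int],
--     top: int,
--     bottom: int,
--     fwd_adj: dict[int, set[int]],
--     fwd_reach: dict[int, set[int]],
-- ) -> set[int]:
--     """Find join-irreducible elements in the quotient lattice.
--
--     An element j is join-irreducible if it has exactly one lower cover
--     in the Hasse diagram.  Bottom is never join-irreducible.
--     """
--     hasse = _quotient_hasse(nodes, fwd_adj, fwd_reach)
--     lower_cover_count: dict[int, int] = {n: 0 for n in nodes}
--     for a, b in hasse:
--         lower_cover_count[a] += 1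
--     return {n for n in nodes
--             if lower_cover_count[n] == 1 and n != bottom}
-- ===== SOURCE B (Python) =====
-- def _covers(direct, fwd_reach):
--     """Lower covers of a node: direct successors not dominated via another successor."""
--     dominated = set()
--     for c in direct:
--         dominated |= (fwd_reach[c] & direct) - {c}
--     return direct - dominated
--
--
-- def _quotient_join_irreducibles(nodes, top, bottom, fwd_adj, fwd_reach):
--     return {n for n in nodes
--             if n != bottom and len(_covers(fwd_adj[n], fwd_reach)) == 1}
-- ===== Notes on version B (the rewrite author's own statement) =====
-- stated objective: simpler
-- what changed: B drops A's global Hasse edge list and per-edge counting dict entirely: for each node it computes the set of lower covers directly as direct minus the union over c in direct of (fwd_reach[c] & direct) - {c}, and tests len == 1.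
-- outside the precondition, e.g. on _quotient_join_irreducibles({0}, 9, 5, {0: {1}}, {}): A returns {0}, B raises KeyError; on _quotient_join_irreducibles({0}, 9, 5, {0: {1, 2, 3}}, {1: {2, 3}, 2: {1}}): A returns set(), B raises KeyError
import Mathlib
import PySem

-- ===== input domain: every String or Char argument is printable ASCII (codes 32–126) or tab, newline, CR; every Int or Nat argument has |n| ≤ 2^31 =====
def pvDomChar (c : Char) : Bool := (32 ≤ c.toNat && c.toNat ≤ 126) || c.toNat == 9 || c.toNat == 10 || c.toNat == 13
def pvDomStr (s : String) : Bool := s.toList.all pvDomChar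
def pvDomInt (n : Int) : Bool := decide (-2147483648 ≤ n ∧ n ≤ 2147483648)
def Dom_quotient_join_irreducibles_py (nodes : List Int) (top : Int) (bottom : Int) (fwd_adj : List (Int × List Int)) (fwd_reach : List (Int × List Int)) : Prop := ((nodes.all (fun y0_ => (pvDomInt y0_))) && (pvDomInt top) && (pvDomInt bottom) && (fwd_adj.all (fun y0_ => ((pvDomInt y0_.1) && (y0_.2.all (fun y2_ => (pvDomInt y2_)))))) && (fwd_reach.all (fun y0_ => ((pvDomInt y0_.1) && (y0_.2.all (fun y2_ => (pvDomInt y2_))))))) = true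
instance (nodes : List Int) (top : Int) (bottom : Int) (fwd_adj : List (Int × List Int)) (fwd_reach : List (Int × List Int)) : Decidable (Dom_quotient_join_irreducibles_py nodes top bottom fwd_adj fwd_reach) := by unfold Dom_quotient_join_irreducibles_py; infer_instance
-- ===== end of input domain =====

-- B replaces A's edge-list construction and per-edge counting dict by a per-node
-- set-algebra computation of the lower covers (objective: simpler; same asymptotic cost).

-- ===== PORT A =====
-- _quotient_hasse: for each a, keep the successors b not dominated via another successor c.
def pv_hasse (nodes : List Int) (fwd_adj : List (Int × List Int)) (fwd_reach : List (Int × List Int)) : List (Int × Int) :=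
  nodes.foldl (fun edges a =>
    let direct := (PySem.Dict.mk fwd_adj).getD a []
    direct.foldl (fun es b =>
      if !(direct.any fun c => !(c == b) && ((PySem.Dict.mk fwd_reach).getD c []).contains b)
      then es ++ [(a, b)] else es) edges) []

def quotient_join_irreducibles_py (nodes : List Int) (top : Int) (bottom : Int) (fwd_adj : List (Int × List Int)) (fwd_reach : List (Int × List Int)) : List Int :=
  let hasse := pv_hasse nodes fwd_adj fwd_reach
  let counts0 := nodes.foldl (fun d n => d.insert n (0 : Int)) PySem.Dict.empty
  let counts := hasse.foldl (fun d p => d.modify p.1 0 (· + 1)) counts0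
  PySem.Set.ofList (nodes.filter fun n => counts.getD n 0 == 1 && !(n == bottom))

-- ===== PORT B =====
-- _covers: direct minus the union over c of (fwd_reach[c] ∩ direct) − {c}.
def pv_covers (direct : List Int) (fwd_reach : List (Int × List Int)) : PySem.Set Int :=
  let dominated := direct.foldl (fun dom c =>
    PySem.Set.union dom (PySem.Set.diff (PySem.Set.inter ((PySem.Dict.mk fwd_reach).getD c []) direct) [c])) PySem.Set.empty
  PySem.Set.diff direct dominated

def quotient_join_irreducibles_py_alt (nodes : List Int) (top : Int) (bottom : Int) (fwd_adj : List (Int × List Int)) (fwd_reach : List (Int × List Int)) : List Int :=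
  PySem.Set.ofList (nodes.filter fun n =>
    !(n == bottom) && (PySem.Set.len (pv_covers ((PySem.Dict.mk fwd_adj).getD n []) fwd_reach) == 1))

-- ===== PRECONDITION & SPEC =====
-- Pre_ excludes inputs on which Python A raises KeyError (a node missing from fwd_adj, or a
-- needed successor missing from fwd_reach).  For a node other than bottom every successor must be
-- a fwd_reach key (B looks all of them up; A looks up all but skippable ones, and on the excluded
-- inputs where A still returns, B raises); for bottom itself reach keys are only needed when it
-- has at least two successors (the only case in which A's inner loop reads fwd_reach; B never
-- looks at bottom at all).  nodes is a Python set, so it carries no duplicates: Nodup only rules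
-- out Lean-side lists that represent no Python input.
def Pre_quotient_join_irreducibles_py (nodes : List Int) (top : Int) (bottom : Int) (fwd_adj : List (Int × List Int)) (fwd_reach : List (Int × List Int)) : Prop :=
  nodes.Nodup ∧
  ∀ a ∈ nodes, (PySem.Dict.mk fwd_adj).contains a = true ∧
    (a = bottom → 2 ≤ ((PySem.Dict.mk fwd_adj).getD a []).length →
      ∀ c ∈ (PySem.Dict.mk fwd_adj).getD a [], (PySem.Dict.mk fwd_reach).contains c = true) ∧
    (a ≠ bottom →
      ∀ c ∈ (PySem.Dict.mk fwd_adj).getD a [], (PySem.Dict.mk fwd_reach).contains c = true)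
instance (nodes : List Int) (top : Int) (bottom : Int) (fwd_adj : List (Int × List Int)) (fwd_reach : List (Int × List Int)) : Decidable (Pre_quotient_join_irreducibles_py nodes top bottom fwd_adj fwd_reach) := by unfold Pre_quotient_join_irreducibles_py; infer_instance

def pvWitness_quotient_join_irreducibles_py : List Int × Int × Int × (List (Int × List Int)) × (List (Int × List Int)) :=
  ([0, 1, 2], 2, 0, [(0, [1]), (1, [2]), (2, [])], [(1, [2]), (2, [])])

def Spec_quotient_join_irreducibles_py (nodes : List Int) (top : Int) (bottom : Int) (fwd_adj : List (Int × List Int)) (fwd_reach : List (Int × List Int)) (out : List Int) : Prop := out = quotient_join_irreducibles_py_alt nodes top bottom fwd_adj fwd_reach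
instance (nodes : List Int) (top : Int) (bottom : Int) (fwd_adj : List (Int × List Int)) (fwd_reach : List (Int × List Int)) (out : List Int) : Decidable (Spec_quotient_join_irreducibles_py nodes top bottom fwd_adj fwd_reach out) := by unfold Spec_quotient_join_irreducibles_py; infer_instance

-- ===== CLAIM (what is proved, stated in full; the proofs are below) =====
def Claim_equal_quotient_join_irreducibles_py : Prop := ∀ (nodes : List Int) (top : Int) (bottom : Int) (fwd_adj : List (Int × List Int)) (fwd_reach : List (Int × List Int)), Dom_quotient_join_irreducibles_py nodes top bottom fwd_adj fwd_reach → Pre_quotient_join_irreducibles_py nodes top bottom fwd_adj fwd_reach → Spec_quotient_join_irreducibles_py nodes top bottom fwd_adj fwd_reach (quotient_join_irreducibles_py nodes top bottom fwd_adj fwd_reach)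

-- ===== LEMMAS AND PROOFS =====

-- A's cover test for successor b of a, as a predicate.
def pvCov (fwd_adj : List (Int × List Int)) (fwd_reach : List (Int × List Int)) (a b : Int) : Bool :=
  !(((PySem.Dict.mk fwd_adj).getD a []).any fun c => !(c == b) && ((PySem.Dict.mk fwd_reach).getD c []).contains b)

theorem pv_hasse_aux (fwd_adj fwd_reach : List (Int × List Int)) (ns : List Int) (acc : List (Int × Int)) :
    ns.foldl (fun edges a =>
      (((PySem.Dict.mk fwd_adj).getD a []).foldl (fun es b =>
        if pvCov fwd_adj fwd_reach a b then es ++ [(a, b)] else es) edges)) acc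
    = acc ++ ns.flatMap (fun a =>
        (((PySem.Dict.mk fwd_adj).getD a []).filter (pvCov fwd_adj fwd_reach a)).map (fun b => (a, b))) := by
  induction ns generalizing acc with
  | nil => simp
  | cons a t ih =>
    rw [List.foldl_cons, PySem.List.foldl_append_if, ih]
    simp [List.flatMap_cons]

theorem pv_hasse_eq (nodes : List Int) (fwd_adj fwd_reach : List (Int × List Int)) :
    pv_hasse nodes fwd_adj fwd_reach
    = nodes.flatMap (fun a =>
        (((PySem.Dict.mk fwd_adj).getD a []).filter (pvCov fwd_adj fwd_reach a)).map (fun b => (a, b))) := by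
  have h := pv_hasse_aux fwd_adj fwd_reach nodes []
  simp only [pvCov] at h
  simpa [pv_hasse] using h

theorem counts0_getD (ns : List Int) (d : PySem.Dict Int Int) (h : ∀ k, d.getD k 0 = 0) (v : Int) :
    (ns.foldl (fun d n => d.insert n (0 : Int)) d).getD v 0 = 0 := by
  induction ns generalizing d with
  | nil => exact h v
  | cons a t ih =>
    simp only [List.foldl_cons]
    exact ih _ (fun k => by rw [PySem.Dict.getD_insert]; split <;> simp [h])

theorem counts_getD (hasse : List (Int × Int)) (d : PySem.Dict Int Int) (v : Int) :
    (hasse.foldl (fun d p => d.modify p.1 0 (· + 1)) d).getD v 0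
    = d.getD v 0 + ((hasse.map Prod.fst).count v : Int) := by
  have h := PySem.Dict.getD_foldl_modify_add_one (hasse.map Prod.fst) d v
  rw [List.foldl_map] at h
  exact h

theorem count_flatMap_pairs (h : Int → List Int) (ns : List Int) (v : Int)
    (hnd : ns.Nodup) (hv : v ∈ ns) :
    ((ns.flatMap (fun a => (h a).map (fun b => (a, b)))).map Prod.fst).count v = (h v).length := by
  have key : ∀ (ms : List Int), ((ms.flatMap (fun a => (h a).map (fun b => (a, b)))).map Prod.fst)
      = ms.flatMap (fun a => List.replicate (h a).length a) := by
    intro ms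
    simp [List.map_flatMap, List.map_map, Function.comp_def, List.map_const']
  rw [key]
  induction ns with
  | nil => cases hv
  | cons a t ih =>
    rcases List.nodup_cons.mp hnd with ⟨ha, ht⟩
    rw [List.flatMap_cons, List.count_append, List.count_replicate]
    rcases List.mem_cons.mp hv with rfl | hv'
    · have h0 : (t.flatMap (fun a => List.replicate (h a).length a)).count v = 0 := by
        refine List.count_eq_zero.mpr ?_
        intro hmem
        rcases List.mem_flatMap.mp hmem with ⟨a', ha', hrep⟩
        exact ha ((List.eq_of_mem_replicate hrep) ▸ ha')
      simp [h0]
    · have hne : v ≠ a := fun e => ha (e ▸ hv')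
      simp [Ne.symm hne, ih ht hv']

theorem dominated_mem (r : Int → List Int) (direct : List Int) (l : List Int) (acc : PySem.Set Int) (b : Int) :
    (b ∈ l.foldl (fun dom c =>
        PySem.Set.union dom (PySem.Set.diff (PySem.Set.inter (r c) direct) [c])) acc)
    ↔ b ∈ acc ∨ ∃ c ∈ l, b ∈ r c ∧ b ∈ direct ∧ b ≠ c := by
  induction l generalizing acc with
  | nil => simp
  | cons c t ih =>
    simp only [List.foldl_cons, ih, PySem.Set.mem_union, PySem.Set.mem_diff, PySem.Set.mem_inter,
      List.mem_cons, List.not_mem_nil, or_false]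
    constructor
    · rintro ((h | ⟨⟨h1, h2⟩, h3⟩) | ⟨c', hc', h⟩)
      · exact Or.inl h
      · exact Or.inr ⟨c, Or.inl rfl, h1, h2, h3⟩
      · exact Or.inr ⟨c', Or.inr hc', h⟩
    · rintro (h | ⟨c', rfl | hc', h⟩)
      · exact Or.inl (Or.inl h)
      · exact Or.inl (Or.inr ⟨⟨h.1, h.2.1⟩, h.2.2⟩)
      · exact Or.inr ⟨c', hc', h⟩

theorem covers_eq (fwd_adj fwd_reach : List (Int × List Int)) (a : Int) :
    pv_covers ((PySem.Dict.mk fwd_adj).getD a []) fwd_reach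
    = ((PySem.Dict.mk fwd_adj).getD a []).filter (pvCov fwd_adj fwd_reach a) := by
  have hdiff : ∀ (s t : List Int), PySem.Set.diff s t = s.filter (fun x => !(t.contains x)) :=
    fun s t => rfl
  unfold pv_covers
  rw [hdiff]
  apply List.filter_congr
  intro b hb
  rw [Bool.eq_iff_iff]
  simp only [Bool.not_eq_true', List.contains_eq_mem, decide_eq_false_iff_not, pvCov,
    List.any_eq_false, Bool.and_eq_true, beq_eq_false_iff_ne, ne_eq, decide_eq_true_eq,
    PySem.Set.empty]
  rw [dominated_mem (fun c => (PySem.Dict.mk fwd_reach).getD c [])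
    ((PySem.Dict.mk fwd_adj).getD a []) ((PySem.Dict.mk fwd_adj).getD a []) ([] : PySem.Set Int) b]
  constructor
  · intro hno c hc h
    exact hno (Or.inr ⟨c, hc, h.2, hb, fun e => h.1 e.symm⟩)
  · intro hall hmem
    rcases hmem with h0 | ⟨c, hc, hr, -, hne⟩
    · exact List.not_mem_nil h0
    · exact hall c hc ⟨fun e => hne e.symm, hr⟩

-- ===== VERDICT (by name: the statement is the Claim_ definition above) =====
theorem quotient_join_irreducibles_py_spec : Claim_equal_quotient_join_irreducibles_py := by
  intro nodes top bottom fwd_adj fwd_reach _ hpre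
  obtain ⟨hnd, _⟩ := hpre
  unfold Spec_quotient_join_irreducibles_py
  simp only [quotient_join_irreducibles_py, quotient_join_irreducibles_py_alt]
  congr 1
  apply List.filter_congr
  intro n hn
  rw [counts_getD, counts0_getD nodes PySem.Dict.empty (fun k => by simp [PySem.Dict.getD_empty]) n,
    pv_hasse_eq,
    count_flatMap_pairs (fun a => ((PySem.Dict.mk fwd_adj).getD a []).filter (pvCov fwd_adj fwd_reach a)) nodes n hnd hn,
    covers_eq]
  simp [PySem.Set.len, Bool.and_comm]
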